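-- pv_equiv track=rewrite | github.com/jieggii/mc.py | mc/builtin/formatters.py | usual_syntax
-- ===== SOURCE A (Python) =====
-- from typing import AnyStr
--
-- def usual_syntax(result: AnyStr) -> AnyStr:
--     formatted_result = ""
--
--     for i in range(len(result)):
--         if i == 0:
--             formatted_result += result[i].upper()
--
--         elif i > 1:
--             if result[i - 1] == " " and result[i - 2] in [".", "?", "!"]:
--                 formatted_result += result[i].upper()
--
--             else:
--                 formatted_result += result[i]
--
--         else:
--             formatted_result += result[i]
--
--     if formatted_result[-1] not in [".", "?", "!"]:
--         formatted_result += "."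
--
--     return formatted_result
-- ===== SOURCE B (Python) =====
-- def usual_syntax(result):
--     def go(s):
--         # capitalize the first char of s and recurse after the next ". "/"? "/"! "
--         cuts = [k for k in (s.find(". "), s.find("? "), s.find("! ")) if k != -1]
--         if not cuts:
--             return s[:1].upper() + s[1:]
--         k = min(cuts)
--         return s[:1].upper() + s[1:k + 2] + go(s[k + 2:])
--
--     s = go(result)
--     return s if s[-1] in ".?!" else s + "."
-- ===== Notes on version B (the rewrite author's own statement) =====
-- stated objective: faster
-- what changed: replaces A's per-character index loop (with its i==0 / i>1 branch ladder and repeated string concatenation) by a recursive descent: str.find locates the next '. '/'? '/'! ' boundary, the whole segment up to and including it is copied by slicing, its first character capitalized, and the function recurses on the remainder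
import Mathlib
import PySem

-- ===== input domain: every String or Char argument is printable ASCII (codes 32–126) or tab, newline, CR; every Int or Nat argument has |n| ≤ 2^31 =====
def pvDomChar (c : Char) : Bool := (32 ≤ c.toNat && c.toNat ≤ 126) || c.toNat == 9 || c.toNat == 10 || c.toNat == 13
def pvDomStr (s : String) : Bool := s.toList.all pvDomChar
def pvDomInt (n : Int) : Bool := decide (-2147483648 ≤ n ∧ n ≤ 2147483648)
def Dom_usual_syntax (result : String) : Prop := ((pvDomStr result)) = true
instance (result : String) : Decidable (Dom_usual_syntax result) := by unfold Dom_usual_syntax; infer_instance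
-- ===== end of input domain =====

-- B replaces A's per-character index loop by a recursive descent (find the next sentence
-- boundary, copy the segment by slicing, capitalize its first char, recurse); measured faster
-- in a timing run. Both raise IndexError on "", excluded by Pre_.

-- ===== PORT A =====
def usual_syntax (result : String) : String :=
  let rs := result.toList
  let fr := (List.range rs.length).foldl (init := ([] : List Char)) (fun acc i =>
    if i = 0 then acc ++ [PySem.Chars.upperChar (rs.getD i ' ')]
    else if 1 < i then
      if rs.getD (i - 1) ' ' = ' ' ∧ rs.getD (i - 2) ' ' ∈ ['.', '?', '!'] then
        acc ++ [PySem.Chars.upperChar (rs.getD i ' ')]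
      else acc ++ [rs.getD i ' ']
    else acc ++ [rs.getD i ' '])
  match PySem.List.pyGet? fr (-1) with
  | none => ""                      -- Python raises IndexError here (empty input); outside Pre_
  | some c => if c ∉ ['.', '?', '!'] then String.ofList (fr ++ ['.']) else String.ofList fr

-- ===== PORT B =====
-- helpers of the B port: the filtered find results ('cuts') and min(cuts) of Source B's go
def pvCutsOf (s : List Char) : List Int :=
  [PySem.Chars.find s ['.', ' '], PySem.Chars.find s ['?', ' '], PySem.Chars.find s ['!', ' ']].filter
    (fun k => k != -1)

def pvMinCut (s : List Char) : Int := (PySem.List.min? (pvCutsOf s) (fun x => x)).getD (-1)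

-- termination of go: the recursive call is on a strictly shorter suffix (proved below the claim
-- block would be too late: go cites it by name here)
theorem pvGo_dec (s : List Char) (h : ¬ pvCutsOf s = []) :
    (PySem.List.slice s (some (pvMinCut s + 2)) none).length < s.length := by
  obtain ⟨m, hm⟩ : ∃ m, PySem.List.min? (pvCutsOf s) (fun x => x) = some m := by
    cases hh : PySem.List.min? (pvCutsOf s) (fun x => x) with
    | none => exact absurd ((PySem.List.min?_eq_none_iff _ _).mp hh) h
    | some m => exact ⟨m, rfl⟩
  have hmem := PySem.List.min?_mem hm
  have hk : pvMinCut s = m := by simp [pvMinCut, hm]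
  simp only [pvCutsOf, List.mem_filter, List.mem_cons, bne_iff_ne, ne_eq] at hmem
  obtain ⟨hsrc, hne⟩ := hmem
  have h0 : 0 ≤ m := by
    rcases hsrc with h | h | h | h
    · have := PySem.Chars.neg_one_le_find s ['.', ' ']; omega
    · have := PySem.Chars.neg_one_le_find s ['?', ' ']; omega
    · have := PySem.Chars.neg_one_le_find s ['!', ' ']; omega
    · simp at h
  have hlen : 2 ≤ s.length := by
    rcases hsrc with h | h | h | h
    · have := (PySem.Chars.find_nonneg_iff s ['.', ' ']).mp (by omega)
      have := this.length_le; simpa using this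
    · have := (PySem.Chars.find_nonneg_iff s ['?', ' ']).mp (by omega)
      have := this.length_le; simpa using this
    · have := (PySem.Chars.find_nonneg_iff s ['!', ' ']).mp (by omega)
      have := this.length_le; simpa using this
    · simp at h
  rw [hk, PySem.List.slice_from s (by omega : (0:Int) ≤ m + 2)]
  simp only [List.length_drop]
  omega

-- Source B's go: capitalize s[0], copy up to and past the next boundary, recurse on the rest
def usual_syntax_go (s : List Char) : List Char :=
  if h : pvCutsOf s = [] then
    PySem.Chars.upper (PySem.List.slice s none (some 1)) ++ PySem.List.slice s (some 1) none
  else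
    PySem.Chars.upper (PySem.List.slice s none (some 1)) ++
      PySem.List.slice s (some 1) (some (pvMinCut s + 2)) ++
      usual_syntax_go (PySem.List.slice s (some (pvMinCut s + 2)) none)
termination_by s.length
decreasing_by exact pvGo_dec s h

def usual_syntax_alt (result : String) : String :=
  let fr := usual_syntax_go result.toList
  match PySem.List.pyGet? fr (-1) with
  | none => ""                      -- Python raises IndexError here (empty input); outside Pre_
  | some c => if c ∈ ['.', '?', '!'] then String.ofList fr else String.ofList (fr ++ ['.'])

-- ===== PRECONDITION & SPEC =====
-- A (and B) raise IndexError on the empty string (s[-1] on ""); Pre_ excludes exactly it.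
def Pre_usual_syntax (result : String) : Prop := result ≠ ""
instance (result : String) : Decidable (Pre_usual_syntax result) := by unfold Pre_usual_syntax; infer_instance
def pvWitness_usual_syntax : String := "hi. there"

def Spec_usual_syntax (result : String) (out : String) : Prop := out = usual_syntax_alt result
instance (result : String) (out : String) : Decidable (Spec_usual_syntax result out) := by unfold Spec_usual_syntax; infer_instance

-- ===== CLAIM (what is proved, stated in full; the proofs are below) =====
def Claim_equal_usual_syntax : Prop := ∀ (result : String), Dom_usual_syntax result → Pre_usual_syntax result → Spec_usual_syntax result (usual_syntax result)

-- ===== LEMMAS AND PROOFS =====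

-- the common characterization: char i of the formatted body
def pvStep (s : List Char) (i : Nat) : Char :=
  if i = 0 ∨ (2 ≤ i ∧ s.getD (i - 1) ' ' = ' ' ∧ s.getD (i - 2) ' ' ∈ ['.', '?', '!']) then
    PySem.Chars.upperChar (s.getD i ' ')
  else s.getD i ' '

def pvTarget (s : List Char) : List Char := (List.range s.length).map (pvStep s)

theorem pvTarget_length (s : List Char) : (pvTarget s).length = s.length := by
  simp [pvTarget]

theorem pvTarget_getElem (s : List Char) (i : Nat) (h : i < (pvTarget s).length) :
    (pvTarget s)[i] = pvStep s i := by
  simp [pvTarget]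

-- a two-char window [s[j], s[j+1]] is a prefix of s.drop j
theorem pv_window_prefix (s : List Char) (j : Nat) (h : j + 1 < s.length) :
    [s[j], s[j + 1]] <+: s.drop j := by
  refine ⟨s.drop (j + 2), ?_⟩
  simp only [List.cons_append, List.nil_append]
  rw [show j + 2 = (j + 1) + 1 by omega, List.getElem_cons_drop, List.getElem_cons_drop]

-- an 'ender + space' window at j makes [s[j], ' '] an infix, hence found by find
theorem pv_occ_find (s : List Char) (j : Nat) (hj : j + 1 < s.length)
    (hsp : s[j + 1] = ' ') : PySem.Chars.find s [s[j], ' '] ≠ -1 := by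
  rw [PySem.Chars.find_ne_neg_one_iff]
  have hp := pv_window_prefix s j hj
  rw [hsp] at hp
  exact hp.isInfix.trans (s.drop_suffix j).isInfix

theorem pv_mem_cuts (s : List Char) (k : Int)
    (h : (k = PySem.Chars.find s ['.', ' '] ∨ k = PySem.Chars.find s ['?', ' '] ∨
          k = PySem.Chars.find s ['!', ' ']) ∧ k ≠ -1) : k ∈ pvCutsOf s := by
  simp only [pvCutsOf, List.mem_filter, List.mem_cons, bne_iff_ne]
  rcases h with ⟨h1, h2⟩
  refine ⟨?_, h2⟩
  tauto

-- no boundary occurs anywhere if cuts is empty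
theorem pv_no_occ_of_cuts_nil (s : List Char) (h : pvCutsOf s = []) (j : Nat)
    (hj : j + 1 < s.length) :
    ¬ ((s[j]'(by omega)) ∈ ['.', '?', '!'] ∧ s[j + 1] = ' ') := by
  rintro ⟨he, hsp⟩
  have hf := pv_occ_find s j hj hsp
  have he3 : (s[j]'(by omega) : Char) = '.' ∨ s[j]'(by omega) = '?' ∨ s[j]'(by omega) = '!' := by
    simpa using he
  have hmem : PySem.Chars.find s [s[j]'(by omega), ' '] ∈ pvCutsOf s := by
    apply pv_mem_cuts _ _ ⟨?_, hf⟩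
    rcases he3 with h' | h' | h' <;> rw [h'] <;> tauto
  rw [h] at hmem
  simp at hmem

theorem pvMinCut_spec (s : List Char) (h : ¬ pvCutsOf s = []) :
    0 ≤ pvMinCut s ∧ (pvMinCut s).toNat + 2 ≤ s.length ∧
      (∀ (h1 : (pvMinCut s).toNat < s.length), s[(pvMinCut s).toNat] ∈ ['.', '?', '!']) ∧
      (∀ (h2 : (pvMinCut s).toNat + 1 < s.length), s[(pvMinCut s).toNat + 1] = ' ') ∧
      ∀ j, ∀ (hj : j + 1 < s.length), j < (pvMinCut s).toNat →
        ¬ ((s[j]'(by omega)) ∈ ['.', '?', '!'] ∧ s[j + 1] = ' ') := by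
  obtain ⟨m, hm⟩ : ∃ m, PySem.List.min? (pvCutsOf s) (fun x => x) = some m := by
    cases hh : PySem.List.min? (pvCutsOf s) (fun x => x) with
    | none => exact absurd ((PySem.List.min?_eq_none_iff _ _).mp hh) h
    | some m => exact ⟨m, rfl⟩
  have hmem := PySem.List.min?_mem hm
  have hk : pvMinCut s = m := by simp [pvMinCut, hm]
  simp only [pvCutsOf, List.mem_filter, List.mem_cons, bne_iff_ne] at hmem
  obtain ⟨hsrc, hne⟩ := hmem
  obtain ⟨sub, hsub, hfind⟩ :
      ∃ sub, sub ∈ [['.', ' '], ['?', ' '], ['!', ' ']] ∧ m = PySem.Chars.find s sub := by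
    rcases hsrc with h' | h' | h' | h'
    · exact ⟨['.', ' '], by simp, h'⟩
    · exact ⟨['?', ' '], by simp, h'⟩
    · exact ⟨['!', ' '], by simp, h'⟩
    · simp at h'
  rw [hfind] at hne
  have h0 : 0 ≤ PySem.Chars.find s sub := by
    have := PySem.Chars.neg_one_le_find s sub
    omega
  obtain ⟨hpre, hminimal⟩ := PySem.Chars.find_spec (s := s) (sub := sub) h0
  obtain ⟨t, ht⟩ := hpre
  have hsl : sub.length = 2 := by
    rcases (by simpa using hsub : sub = ['.', ' '] ∨ sub = ['?', ' '] ∨ sub = ['!', ' ']) with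
      h' | h' | h' <;> simp [h']
  have hlen2 : (PySem.Chars.find s sub).toNat + 2 ≤ s.length := by
    have := congrArg List.length ht
    simp [hsl] at this
    omega
  have hs0 : ∀ (hh : (PySem.Chars.find s sub).toNat < s.length),
      s[(PySem.Chars.find s sub).toNat] = sub[0]'(by omega) := by
    intro hh
    have e := congrArg (fun l => l[0]?) ht
    simp only [List.getElem?_drop, Nat.add_zero] at e
    rw [List.getElem?_append_left (by omega), List.getElem?_eq_getElem (by omega),
      List.getElem?_eq_getElem hh] at e
    simpa using e.symm
  have hs1 : ∀ (hh : (PySem.Chars.find s sub).toNat + 1 < s.length),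
      s[(PySem.Chars.find s sub).toNat + 1] = sub[1]'(by omega) := by
    intro hh
    have e := congrArg (fun l => l[1]?) ht
    simp only [List.getElem?_drop] at e
    rw [List.getElem?_append_left (by omega), List.getElem?_eq_getElem (by omega),
      List.getElem?_eq_getElem hh] at e
    simpa using e.symm
  rw [hk, hfind]
  refine ⟨h0, hlen2, ?_, ?_, ?_⟩
  · intro h1
    rw [hs0 h1]
    rcases (by simpa using hsub : sub = ['.', ' '] ∨ sub = ['?', ' '] ∨ sub = ['!', ' ']) with
      h' | h' | h' <;> simp [h']
  · intro h2
    rw [hs1 h2]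
    rcases (by simpa using hsub : sub = ['.', ' '] ∨ sub = ['?', ' '] ∨ sub = ['!', ' ']) with
      h' | h' | h' <;> simp [h']
  · intro j hj hjM
    rintro ⟨he, hsp⟩
    have hf := pv_occ_find s j hj hsp
    have hmem' : PySem.Chars.find s [s[j]'(by omega), ' '] ∈ pvCutsOf s := by
      apply pv_mem_cuts _ _ ⟨?_, hf⟩
      rcases (by simpa using he : (s[j]'(by omega) : Char) = '.' ∨ s[j]'(by omega) = '?' ∨
          s[j]'(by omega) = '!') with h' | h' | h' <;> rw [h'] <;> tauto
    have hle := PySem.List.min?_isMin hm _ hmem'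
    simp only [hfind] at hle
    have h0' : (0:Int) ≤ PySem.Chars.find s [s[j]'(by omega), ' '] := by
      have := PySem.Chars.neg_one_le_find s [s[j]'(by omega), ' ']
      omega
    obtain ⟨_, hmin'⟩ := PySem.Chars.find_spec h0'
    have hjlt : j < (PySem.Chars.find s [s[j]'(by omega), ' ']).toNat := by omega
    have hp := pv_window_prefix s j hj
    rw [hsp] at hp
    exact hmin' j hjlt hp

-- B's recursive descent computes the characterization
theorem pv_go_eq_target (s : List Char) : usual_syntax_go s = pvTarget s := by
  induction s using usual_syntax_go.induct with
  | case1 s h =>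
    rw [usual_syntax_go, dif_pos h]
    rw [PySem.List.slice_to s (by omega : (0:Int) ≤ 1),
      PySem.List.slice_from s (by omega : (0:Int) ≤ 1)]
    simp only [PySem.Chars.upper, Int.toNat_one]
    apply List.ext_getElem
    · simp [pvTarget_length]; omega
    · intro i h1 h2
      rw [pvTarget_getElem]
      rcases Nat.eq_zero_or_pos i with hi0 | hip
      · subst hi0
        have hl0 : 0 < s.length := by
          simp [pvTarget_length] at h2; omega
        rw [List.getElem_append_left (by simp; omega)]
        simp only [List.getElem_map]
        have hst : pvStep s 0 = PySem.Chars.upperChar (s.getD 0 ' ') := by simp [pvStep]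
        rw [hst, List.getD_eq_getElem s ' ' hl0, List.getElem_take]
      · have hlen : i < s.length := by simpa [pvTarget_length] using h2
        have hl1 : ((s.take 1).map PySem.Chars.upperChar).length = 1 := by
          simp; omega
        rw [List.getElem_append_right (by omega)]
        simp only [hl1, List.getElem_drop]
        have harith : 1 + (i - 1) = i := by omega
        simp only [harith]
        have hcond : ¬ (i = 0 ∨ (2 ≤ i ∧ s.getD (i - 1) ' ' = ' ' ∧
            s.getD (i - 2) ' ' ∈ ['.', '?', '!'])) := by
          rintro (hc | ⟨hc2, hcsp, hce⟩)
          · omega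
          · have hj : (i - 2) + 1 < s.length := by omega
            apply pv_no_occ_of_cuts_nil s h (i - 2) hj
            refine ⟨?_, ?_⟩
            · rw [List.getD_eq_getElem s ' ' (show i - 2 < s.length by omega)] at hce
              exact hce
            · rw [List.getD_eq_getElem s ' ' (show i - 1 < s.length by omega)] at hcsp
              simp only [show i - 2 + 1 = i - 1 from by omega]
              exact hcsp
        simp only [pvStep, if_neg hcond]
        exact (List.getD_eq_getElem s ' ' hlen).symm
  | case2 s h ih =>
    obtain ⟨h0, hlen, hdot, hsp, hmin⟩ := pvMinCut_spec s h
    rw [usual_syntax_go, dif_neg h, ih]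
    rw [PySem.List.slice_to s (by omega : (0:Int) ≤ 1),
      PySem.List.slice_from s (by omega : (0:Int) ≤ pvMinCut s + 2),
      PySem.List.slice_toNat s (by omega : (0:Int) ≤ 1) (by omega : (0:Int) ≤ pvMinCut s + 2)]
    simp only [PySem.Chars.upper, Int.toNat_one]
    set M := (pvMinCut s).toNat with hM
    have hM2 : (pvMinCut s + 2).toNat = M + 2 := by omega
    rw [hM2]
    apply List.ext_getElem
    · simp [pvTarget_length]; omega
    · intro i h1 h2
      have hlens : i < s.length := by simpa [pvTarget_length] using h2
      rw [pvTarget_getElem]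
      have hl1 : ((s.take 1).map PySem.Chars.upperChar).length = 1 := by simp; omega
      have hl2 : (((s.drop 1).take (M + 2 - 1))).length = M + 1 := by simp; omega
      rcases Nat.eq_zero_or_pos i with hi0 | hip
      · subst hi0
        rw [List.getElem_append_left (by rw [List.length_append, hl1]; omega),
          List.getElem_append_left (by omega)]
        simp only [List.getElem_map]
        have hst : pvStep s 0 = PySem.Chars.upperChar (s.getD 0 ' ') := by simp [pvStep]
        rw [hst, List.getD_eq_getElem s ' ' (by omega : 0 < s.length), List.getElem_take]
      · by_cases him : i ≤ M + 1
        · -- inside the copied segment: no boundary before M, so not capitalized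
          rw [List.getElem_append_left (by rw [List.length_append, hl1]; omega),
            List.getElem_append_right (by omega)]
          simp only [hl1, List.getElem_take, List.getElem_drop]
          have harith : 1 + (i - 1) = i := by omega
          simp only [harith]
          have hcond : ¬ (i = 0 ∨ (2 ≤ i ∧ s.getD (i - 1) ' ' = ' ' ∧
              s.getD (i - 2) ' ' ∈ ['.', '?', '!'])) := by
            rintro (hc | ⟨hc2, hcsp, hce⟩)
            · omega
            · have hj : (i - 2) + 1 < s.length := by omega
              apply hmin (i - 2) hj (by omega)
              refine ⟨?_, ?_⟩
              · rw [List.getD_eq_getElem s ' ' (show i - 2 < s.length by omega)] at hce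
                exact hce
              · rw [List.getD_eq_getElem s ' ' (show i - 1 < s.length by omega)] at hcsp
                simp only [show i - 2 + 1 = i - 1 from by omega]
                exact hcsp
          simp only [pvStep, if_neg hcond]
          exact (List.getD_eq_getElem s ' ' hlens).symm
        · -- inside the recursive tail
          have hiM : M + 2 ≤ i := by omega
          rw [List.getElem_append_right (by rw [List.length_append, hl1, hl2]; omega)]
          simp only [List.length_append, hl1, hl2]
          simp only [show 1 + (M + 1) = M + 2 from by omega]
          rw [pvTarget_getElem]
          have hju : i - (M + 2) < (s.drop (M + 2)).length := by
            rw [List.length_drop]; omega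
          have hval : ∀ k, k < (s.drop (M + 2)).length →
              (s.drop (M + 2)).getD k ' ' = s.getD (M + 2 + k) ' ' := by
            intro k hk
            have hk' : M + 2 + k < s.length := by rw [List.length_drop] at hk; omega
            rw [List.getD_eq_getElem _ ' ' hk, List.getD_eq_getElem s ' ' hk',
              List.getElem_drop]
          by_cases hj0 : i - (M + 2) = 0
          · have e1 : pvStep (s.drop (M + 2)) (i - (M + 2)) =
                PySem.Chars.upperChar ((s.drop (M + 2)).getD 0 ' ') := by
              simp [pvStep, hj0]
            have c1 : s.getD (i - 1) ' ' = ' ' := by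
              rw [show i - 1 = M + 1 from by omega,
                List.getD_eq_getElem s ' ' (show M + 1 < s.length by omega)]
              exact hsp _
            have c2 : s.getD (i - 2) ' ' ∈ ['.', '?', '!'] := by
              rw [show i - 2 = M from by omega,
                List.getD_eq_getElem s ' ' (show M < s.length by omega)]
              exact hdot _
            have e2 : pvStep s i = PySem.Chars.upperChar (s.getD i ' ') := by
              rw [pvStep, if_pos (Or.inr ⟨show 2 ≤ i from by omega, c1, c2⟩)]
            rw [e1, e2, hval 0 (by omega), show M + 2 + 0 = i from by omega]
          · by_cases hj1 : i - (M + 2) = 1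
            · have e1 : pvStep (s.drop (M + 2)) (i - (M + 2)) =
                  (s.drop (M + 2)).getD 1 ' ' := by
                simp [pvStep, hj1]
              have c2 : s.getD (i - 2) ' ' = ' ' := by
                rw [show i - 2 = M + 1 from by omega,
                  List.getD_eq_getElem s ' ' (show M + 1 < s.length by omega)]
                exact hsp _
              have e2 : pvStep s i = s.getD i ' ' := by
                rw [pvStep, if_neg ?_]
                rintro (h' | ⟨-, -, hmem⟩)
                · omega
                · rw [c2] at hmem
                  simp at hmem
              rw [e1, e2, hval 1 (by omega), show M + 2 + 1 = i from by omega]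
            · have hj2 : 2 ≤ i - (M + 2) := by omega
              have w1 : (s.drop (M + 2)).getD (i - (M + 2) - 1) ' ' = s.getD (i - 1) ' ' := by
                rw [hval (i - (M + 2) - 1) (by omega),
                  show M + 2 + (i - (M + 2) - 1) = i - 1 from by omega]
              have w2 : (s.drop (M + 2)).getD (i - (M + 2) - 2) ' ' = s.getD (i - 2) ' ' := by
                rw [hval (i - (M + 2) - 2) (by omega),
                  show M + 2 + (i - (M + 2) - 2) = i - 2 from by omega]
              have wv : (s.drop (M + 2)).getD (i - (M + 2)) ' ' = s.getD i ' ' := by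
                rw [hval (i - (M + 2)) hju, show M + 2 + (i - (M + 2)) = i from by omega]
              simp only [pvStep, w1, w2, wv]
              apply if_congr ?_ rfl rfl
              constructor
              · rintro (h' | ⟨-, hc⟩)
                · omega
                · exact Or.inr ⟨by omega, hc⟩
              · rintro (h' | ⟨-, hc⟩)
                · omega
                · exact Or.inr ⟨hj2, hc⟩

theorem pv_A_body_eq_target (s : List Char) :
    (List.range s.length).foldl (init := ([] : List Char)) (fun acc i =>
      if i = 0 then acc ++ [PySem.Chars.upperChar (s.getD i ' ')]
      else if 1 < i then
        if s.getD (i - 1) ' ' = ' ' ∧ s.getD (i - 2) ' ' ∈ ['.', '?', '!'] then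
          acc ++ [PySem.Chars.upperChar (s.getD i ' ')]
        else acc ++ [s.getD i ' ']
      else acc ++ [s.getD i ' ']) = pvTarget s := by
  have hb : (fun (acc : List Char) (i : Nat) =>
      if i = 0 then acc ++ [PySem.Chars.upperChar (s.getD i ' ')]
      else if 1 < i then
        if s.getD (i - 1) ' ' = ' ' ∧ s.getD (i - 2) ' ' ∈ ['.', '?', '!'] then
          acc ++ [PySem.Chars.upperChar (s.getD i ' ')]
        else acc ++ [s.getD i ' ']
      else acc ++ [s.getD i ' '])
      = fun acc i => acc ++ [pvStep s i] := by
    funext acc i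
    simp only [pvStep]
    split_ifs <;> first | rfl | omega | tauto
  rw [hb, PySem.List.foldl_append_singleton_eq_map]
  simp [pvTarget]

-- ===== VERDICT (by name: the statement is the Claim_ definition above) =====
theorem usual_syntax_spec : Claim_equal_usual_syntax := by
  intro result _ _
  unfold Spec_usual_syntax usual_syntax usual_syntax_alt
  simp only [pv_A_body_eq_target, pv_go_eq_target]
  cases PySem.List.pyGet? (pvTarget result.toList) (-1) with
  | none => rfl
  | some c => simp only [ite_not]
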